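-- pv_equiv track=rewrite | github.com/edytaroz/WDI | zad10wdi4vol2.py | zera
-- ===== SOURCE A (Python) =====
-- def zera(tab):
--     n = len(tab)
--     wiersze = [False for _ in range(n)]
--     kolumny = [False for _ in range(n)]
--     for i in range(n):
--         for j in range(n):
--             if tab[i][j] == 0:
--                 wiersze[i] = True
--                 kolumny[j] = True
--     f = True
--     for k in range(n):
--         if wiersze[k] is False or kolumny[k] is False:
--             f = False
--     return f
-- ===== SOURCE B (Python) =====
-- def zera(tab):
--     n = len(tab)
--     return (all(any(tab[i][j] == 0 for j in range(n)) for i in range(n))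
--             and all(any(tab[i][j] == 0 for i in range(n)) for j in range(n)))
-- ===== Notes on version B (the rewrite author's own statement) =====
-- stated objective: simpler
-- what changed: Replaced the two boolean marker arrays and the final verification pass by two direct short-circuiting all/any scans (every row has a zero, every column has a zero).
import Mathlib
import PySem

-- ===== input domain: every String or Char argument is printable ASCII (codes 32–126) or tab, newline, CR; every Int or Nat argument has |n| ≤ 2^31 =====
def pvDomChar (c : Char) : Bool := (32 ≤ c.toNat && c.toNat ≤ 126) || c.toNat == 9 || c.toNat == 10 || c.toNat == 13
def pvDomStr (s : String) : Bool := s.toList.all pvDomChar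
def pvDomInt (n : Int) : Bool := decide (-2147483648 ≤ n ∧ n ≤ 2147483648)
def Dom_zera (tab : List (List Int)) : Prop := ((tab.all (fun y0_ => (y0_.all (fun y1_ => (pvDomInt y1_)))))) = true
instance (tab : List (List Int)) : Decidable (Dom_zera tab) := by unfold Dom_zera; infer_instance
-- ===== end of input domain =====

-- B drops A's two boolean marker arrays and final verification pass in favour of two direct
-- all/any scans (every row has a zero, every column has a zero); simpler, short-circuiting.

-- ===== PORT A =====
-- Literal port of A. tab[i][j] is pyGetD with default 1 (≠ 0): the default is unreachable
-- under Pre_zera (all indices in range there). wiersze[i] = True is pySetD.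
def zera (tab : List (List Int)) : Bool :=
  let n : Int := (tab.length : Int)
  let wiersze : List Bool := (PySem.List.pyRange 0 n 1).map (fun _ => false)
  let kolumny : List Bool := (PySem.List.pyRange 0 n 1).map (fun _ => false)
  let wk :=
    (PySem.List.pyRange 0 n 1).foldl (fun wk i =>
      (PySem.List.pyRange 0 n 1).foldl (fun wk j =>
        if PySem.List.pyGetD (PySem.List.pyGetD tab i []) j 1 = 0 then
          (PySem.List.pySetD wk.1 i true, PySem.List.pySetD wk.2 j true)
        else wk) wk) (wiersze, kolumny)
  (PySem.List.pyRange 0 n 1).foldl (fun f k =>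
    if PySem.List.pyGetD wk.1 k true = false ∨ PySem.List.pyGetD wk.2 k true = false
    then false else f) true

-- ===== PORT B =====
-- Port of Source B. tab[i][j] is getD with default 1 (≠ 0): exact under Pre_zera (indices in range).
def zera_alt (tab : List (List Int)) : Bool :=
  let n := tab.length
  ((List.range n).all fun i => (List.range n).any fun j => (tab.getD i []).getD j 1 == 0) &&
  ((List.range n).all fun j => (List.range n).any fun i => (tab.getD i []).getD j 1 == 0)

-- ===== PRECONDITION & SPEC =====
-- Pre_ excludes exactly the ragged tables with some row shorter than len(tab), on which the
-- Python A raises IndexError; on every other input A returns normally.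
def Pre_zera (tab : List (List Int)) : Prop := ∀ row ∈ tab, tab.length ≤ row.length
instance (tab : List (List Int)) : Decidable (Pre_zera tab) := by unfold Pre_zera; infer_instance

def pvWitness_zera : List (List Int) := [[0, 1], [2, 0]]

def Spec_zera (tab : List (List Int)) (out : Bool) : Prop := out = zera_alt tab
instance (tab : List (List Int)) (out : Bool) : Decidable (Spec_zera tab out) := by unfold Spec_zera; infer_instance

-- ===== CLAIM (what is proved, stated in full; the proofs are below) =====
def Claim_equal_zera : Prop := ∀ (tab : List (List Int)), Dom_zera tab → Pre_zera tab → Spec_zera tab (zera tab)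

-- ===== LEMMAS AND PROOFS =====

-- A's inner loop on wiersze: repeatedly setting the same index collapses to one conditional set.
theorem foldl_set_fixed {β : Type} (Q : β → Prop) [DecidablePred Q] (i : Nat) :
    ∀ (js : List β) (w : List Bool),
      js.foldl (fun w j => if Q j then w.set i true else w) w
        = if js.any (fun j => decide (Q j)) then w.set i true else w := by
  intro js
  induction js with
  | nil => intro w; simp
  | cons j js ih =>
    intro w
    by_cases hq : Q j <;> simp [List.foldl_cons, hq, ih, List.set_set]

-- a marking fold (each step conditionally sets the index it computes) preserves length.
theorem length_foldl_mark {β : Type} (Q : β → Prop) [DecidablePred Q] (idx : β → Nat) :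
    ∀ (js : List β) (w : List Bool),
      (js.foldl (fun w j => if Q j then w.set (idx j) true else w) w).length = w.length := by
  intro js
  induction js with
  | nil => intro w; rfl
  | cons j js ih =>
    intro w
    by_cases hq : Q j <;> simp [List.foldl_cons, hq, ih]

-- marking fold, pointwise: position k ends true iff it started true or some visited j with Q j marks k.
theorem getD_foldl_mark {β : Type} (Q : β → Prop) [DecidablePred Q] (idx : β → Nat) :
    ∀ (js : List β) (w : List Bool) (k : Nat),
      (∀ j ∈ js, idx j < w.length) →
      (js.foldl (fun w j => if Q j then w.set (idx j) true else w) w).getD k false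
        = (w.getD k false || js.any (fun j => idx j == k && decide (Q j))) := by
  intro js
  induction js with
  | nil => intro w k _; simp
  | cons j js ih =>
    intro w k h
    have hj : idx j < w.length := h j (List.mem_cons_self ..)
    have h' : ∀ x ∈ js, idx x < (if Q j then w.set (idx j) true else w).length := by
      intro x hx
      by_cases hq : Q j <;> simp [hq, h x (List.mem_cons_of_mem _ hx)]
    rw [List.foldl_cons, ih _ k h']
    by_cases hq : Q j
    · by_cases hk : idx j = k
      · subst hk
        simp [hq, List.getD_eq_getElem?_getD, List.getElem?_set_self hj]
      · have hb : (idx j == k) = false := by simp [hk]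
        simp [hq, List.getD_eq_getElem?_getD, List.getElem?_set_ne hk, hb]
    · simp [hq]

-- A's verification loop is List.all of the negated condition.
theorem foldl_check {β : Type} (R : β → Prop) [DecidablePred R] :
    ∀ (ks : List β) (b : Bool),
      ks.foldl (fun f k => if R k then false else f) b
        = (b && ks.all (fun k => !decide (R k))) := by
  intro ks
  induction ks with
  | nil => intro b; simp
  | cons k ks ih =>
    intro b
    by_cases hr : R k
    · rw [List.foldl_cons, if_pos hr, ih false]; simp [hr]
    · rw [List.foldl_cons, if_neg hr, ih b]; simp [hr]

-- picking out index k in an any over range n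
theorem any_range_eq_self {n k : Nat} (hk : k < n) (b : Nat → Bool) :
    (List.range n).any (fun i => i == k && b i) = b k := by
  rw [Bool.eq_iff_iff]
  simp only [List.any_eq_true, List.mem_range, Bool.and_eq_true, beq_iff_eq]
  constructor
  · rintro ⟨i, _, rfl, h⟩; exact h
  · intro h; exact ⟨k, hk, rfl, h⟩

theorem all_and_distrib {β : Type} (l : List β) (f g : β → Bool) :
    l.all (fun x => f x && g x) = (l.all f && l.all g) := by
  rw [Bool.eq_iff_iff]
  simp only [List.all_eq_true, Bool.and_eq_true]
  exact ⟨fun h => ⟨fun x hx => (h x hx).1, fun x hx => (h x hx).2⟩,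
         fun ⟨h1, h2⟩ x hx => ⟨h1 x hx, h2 x hx⟩⟩

-- the nested kolumny fold preserves length
theorem length_c_fold (p : Nat → Nat → Prop) [∀ i, DecidablePred (p i)] (n : Nat) :
    ∀ (is : List Nat) (c : List Bool),
      (is.foldl (fun c i => (List.range n).foldl
          (fun c j => if p i j then c.set j true else c) c) c).length = c.length := by
  intro is
  induction is with
  | nil => intro c; rfl
  | cons i is ih =>
    intro c
    rw [List.foldl_cons, ih, length_foldl_mark (p i) (fun j => j)]

-- the kolumny side: the nested fold, pointwise
theorem c_fold_getD (p : Nat → Nat → Prop) [∀ i, DecidablePred (p i)] (n : Nat) :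
    ∀ (is : List Nat) (c : List Bool) (k : Nat), c.length = n → k < n →
      (is.foldl (fun c i => (List.range n).foldl
          (fun c j => if p i j then c.set j true else c) c) c).getD k false
        = (c.getD k false || is.any (fun i => decide (p i k))) := by
  intro is
  induction is with
  | nil => intro c k _ _; simp
  | cons i is ih =>
    intro c k hc hk
    rw [List.foldl_cons]
    have hlen : ((List.range n).foldl (fun c j => if p i j then c.set j true else c) c).length = n := by
      rw [length_foldl_mark (p i) (fun j => j)]; exact hc
    rw [ih _ k hlen hk,
        getD_foldl_mark (p i) (fun j => j) (List.range n) c k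
          (by intro j hj; rw [hc]; exact List.mem_range.mp hj),
        any_range_eq_self hk]
    simp [Bool.or_assoc]

theorem foldl_pair_split {α β γ : Type} (step : α × γ → β → α × γ)
    (f : α → β → α) (g : γ → β → γ)
    (hstep : ∀ s e, step s e = (f s.1 e, g s.2 e)) (l : List β) (a : α) (b : γ) :
    l.foldl step (a, b) = (l.foldl f a, l.foldl g b) := by
  have h : step = fun s e => (f s.1 e, g s.2 e) := funext fun s => funext fun e => hstep s e
  rw [h, PySem.List.foldl_prod_mk]

theorem zera_eq_alt (tab : List (List Int)) : zera tab = zera_alt tab := by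
  simp only [zera, zera_alt, PySem.List.pyRange_zero_nat]
  simp only [List.foldl_map, List.map_map, PySem.List.pyGetD_natCast, PySem.List.pySetD_natCast]
  set n := tab.length with hn
  set p : Nat → Nat → Prop := fun i j => (tab.getD i []).getD j 1 = 0 with hp
  rw [show (List.map ((fun _ => false) ∘ fun k : Nat => (k : Int)) (List.range n))
        = List.replicate n false by simp [Function.comp_def, List.map_const']]
  -- split the pair fold into its wiersze and kolumny components
  rw [foldl_pair_split
    (fun wk (i : Nat) => (List.range n).foldl
      (fun wk (j : Nat) => if p i j then (wk.1.set i true, wk.2.set j true) else wk) wk)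
    (fun w i => (List.range n).foldl (fun w j => if p i j then w.set i true else w) w)
    (fun c i => (List.range n).foldl (fun c j => if p i j then c.set j true else c) c)
    (fun wk i => by
      have := foldl_pair_split
        (fun wk (j : Nat) => if p i j then (wk.1.set i true, wk.2.set j true) else wk)
        (fun w j => if p i j then w.set i true else w)
        (fun c j => if p i j then c.set j true else c)
        (fun s e => by by_cases h : p i e <;> simp [h]) (List.range n) wk.1 wk.2
      simpa using this)
    (List.range n) (List.replicate n false) (List.replicate n false)]
  -- collapse the fixed-index inner fold on the wiersze side
  rw [show (fun (w : List Bool) (i : Nat) =>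
        (List.range n).foldl (fun w j => if p i j then w.set i true else w) w)
      = (fun w i => if (List.range n).any (fun j => decide (p i j)) then w.set i true else w) by
    funext w i; rw [foldl_set_fixed (p i) i]]
  set W : Nat → Bool := fun i => (List.range n).any (fun j => decide (p i j)) with hW
  set wfin := (List.range n).foldl
      (fun w i => if W i then w.set i true else w) (List.replicate n false) with hwfin
  set cfin := (List.range n).foldl (fun c i =>
      (List.range n).foldl (fun c j => if p i j then c.set j true else c) c)
      (List.replicate n false) with hcfin
  have lenw : wfin.length = n := by
    rw [hwfin, length_foldl_mark (fun i => W i = true) (fun i => i)]; simp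
  have lenc : cfin.length = n := by
    rw [hcfin, length_c_fold p n]; simp
  have hwk : ∀ k, k < n → wfin.getD k true = W k := by
    intro k hk
    rw [List.getD_eq_getElem _ _ (lenw ▸ hk), ← List.getD_eq_getElem _ false (lenw ▸ hk), hwfin,
        getD_foldl_mark (fun i => W i = true) (fun i => i) (List.range n) _ k
          (by intro j hj; simp [List.mem_range.mp hj]),
        any_range_eq_self hk (fun i => decide (W i = true))]
    simp
  have hck : ∀ k, k < n → cfin.getD k true = (List.range n).any (fun i => decide (p i k)) := by
    intro k hk
    rw [List.getD_eq_getElem _ _ (lenc ▸ hk), ← List.getD_eq_getElem _ false (lenc ▸ hk), hcfin,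
        c_fold_getD p n (List.range n) (List.replicate n false) k (by simp) hk]
    simp
  -- the verification loop
  rw [foldl_check (fun k : Nat => wfin.getD k true = false ∨ cfin.getD k true = false)
        (List.range n) true, Bool.true_and, ← all_and_distrib]
  rw [Bool.eq_iff_iff]
  simp only [List.all_eq_true, List.mem_range]
  refine forall_congr' fun k => imp_congr_right fun hk => ?_
  rw [hwk k hk, hck k hk]
  simp only [hW, hp, Bool.beq_eq_decide_eq]
  simp [-Bool.decide_or]

-- ===== VERDICT (by name: the statement is the Claim_ definition above) =====
theorem zera_spec : Claim_equal_zera := by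
  intro tab _ _
  unfold Spec_zera
  exact zera_eq_alt tab
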